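-- pv_equiv track=rewrite | github.com/ihoover/crypto | helpers.py | text_to_nums
-- ===== SOURCE A (Python) =====
-- def text_to_nums(text):
--
--     # turn into numbers
--     plain_bytes = [ord(c) for c in text]
--
--     # put the bytes into blocks
--     plain_nums = []
--     working_num = 0
--     length = 0
--     block_length = 15
--     for byte in plain_bytes:
--         working_num <<= 8
--         working_num += byte
--         length+=1
--         if length == block_length:
--             plain_nums.append(working_num)
--             working_num = 0
--             length = 0
--
--     if length != 0:
--         plain_nums.append(working_num)
--
--     return plain_nums
-- ===== SOURCE B (Python) =====
-- def text_to_nums(text):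
--     chunks = [text[i:i + 15] for i in range(0, len(text), 15)]
--     result = []
--     for chunk in chunks:
--         num = 0
--         for c in chunk:
--             num = num * 256 + ord(c)
--         result.append(num)
--     return result
-- ===== Notes on version B (the rewrite author's own statement) =====
-- stated objective: simpler
-- what changed: Replaces the single stateful loop (running block counter, shift-accumulate, trailing flush) by an explicit chunk-into-15s step followed by a plain big-endian fold per chunk.
import Mathlib
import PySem

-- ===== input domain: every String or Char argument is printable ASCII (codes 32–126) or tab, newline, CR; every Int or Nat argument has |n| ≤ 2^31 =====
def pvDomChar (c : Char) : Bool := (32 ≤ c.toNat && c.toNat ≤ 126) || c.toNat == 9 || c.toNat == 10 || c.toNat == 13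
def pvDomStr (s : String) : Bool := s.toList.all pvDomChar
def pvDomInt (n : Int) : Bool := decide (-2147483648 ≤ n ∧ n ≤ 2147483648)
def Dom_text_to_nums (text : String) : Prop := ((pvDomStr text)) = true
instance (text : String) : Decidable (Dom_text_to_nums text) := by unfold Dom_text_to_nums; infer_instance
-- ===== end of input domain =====

-- B replaces A's stateful shift-accumulate loop with explicit chunking into 15s plus a per-chunk fold (objective: simpler).
-- ===== PORT A =====
-- one loop iteration of A: '<<= 8' on a Python int is '* 256'
def pvStepA (s : List Int × Int × Int) (byte : Int) : List Int × Int × Int :=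
  let working_num := s.2.1 * 256 + byte
  let length := s.2.2 + 1
  if length == 15 then (s.1 ++ [working_num], 0, 0) else (s.1, working_num, length)

def text_to_nums (text : String) : List Int :=
  let plain_bytes : List Int := text.toList.map (fun c => (c.toNat : Int))
  let s := plain_bytes.foldl pvStepA ([], 0, 0)
  if s.2.2 ≠ 0 then s.1 ++ [s.2.1] else s.1

-- ===== PORT B =====
-- text[i:i+15] slices of Source B, as successive take/drop pieces
def pvChunk15 : List Char → List (List Char)
  | [] => []
  | c :: rest => ((c :: rest).take 15) :: pvChunk15 ((c :: rest).drop 15)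
termination_by l => l.length
decreasing_by simp

def text_to_nums_alt (text : String) : List Int :=
  (pvChunk15 text.toList).map (fun ch => ch.foldl (fun n c => n * 256 + (c.toNat : Int)) 0)

-- ===== PRECONDITION & SPEC =====
def Spec_text_to_nums (text : String) (out : List Int) : Prop := out = text_to_nums_alt text
instance (text : String) (out : List Int) : Decidable (Spec_text_to_nums text out) := by unfold Spec_text_to_nums; infer_instance

-- ===== CLAIM (what is proved, stated in full; the proofs are below) =====
def Claim_equal_text_to_nums : Prop := ∀ (text : String), Dom_text_to_nums text → Spec_text_to_nums text (text_to_nums text)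

-- ===== LEMMAS AND PROOFS =====

-- A's loop over a stretch of characters that never fills a block: it just keeps folding into working_num
theorem pvChunk15_nil : pvChunk15 [] = [] := by rw [pvChunk15.eq_def]

theorem pvChunk15_cons (c : Char) (rest : List Char) :
    pvChunk15 (c :: rest) = ((c :: rest).take 15) :: pvChunk15 ((c :: rest).drop 15) := by
  rw [pvChunk15.eq_def]

theorem pvStepA_open (acc : List Int) (w : Int) (n b : Int) (h : ¬ (n + 1 == 15) = true) :
    pvStepA (acc, w, n) b = (acc, w * 256 + b, n + 1) := by
  simp [pvStepA, h]

theorem pv_noclose (l : List Char) (acc : List Int) (w : Int) (n : ℕ)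
    (h : n + l.length < 15) :
    l.foldl (fun s c => pvStepA s ((c.toNat : Int))) (acc, w, (n : Int))
      = (acc, l.foldl (fun m c => m * 256 + (c.toNat : Int)) w, ((n + l.length : ℕ) : Int)) := by
  induction l generalizing w n with
  | nil => simp
  | cons hd t ih =>
    have hne : ¬ ((n : Int) + 1 == 15) = true := by
      simp at h ⊢; omega
    rw [List.foldl_cons, pvStepA_open _ _ _ _ hne,
      show ((n : Int) + 1) = (((n + 1 : ℕ)) : Int) by push_cast; ring,
      ih (w * 256 + hd.toNat) (n + 1) (by simp at h ⊢; omega)]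
    simp at h ⊢; omega

-- A's loop over exactly the characters that complete the current block: it closes the block and resets
theorem pv_close (l : List Char) (acc : List Int) (w : Int) (n : ℕ)
    (hn : n < 15) (h : n + l.length = 15) :
    l.foldl (fun s c => pvStepA s ((c.toNat : Int))) (acc, w, (n : Int))
      = (acc ++ [l.foldl (fun m c => m * 256 + (c.toNat : Int)) w], 0, 0) := by
  induction l generalizing w n with
  | nil => simp at h; omega
  | cons hd t ih =>
    by_cases ht : t = []
    · subst ht
      simp at h
      subst h
      simp [pvStepA]
    · have hlt : 0 < t.length := List.length_pos_iff.mpr ht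
      have hne : ¬ ((n : Int) + 1 == 15) = true := by
        simp at h ⊢; omega
      rw [List.foldl_cons, pvStepA_open _ _ _ _ hne,
        show ((n : Int) + 1) = (((n + 1 : ℕ)) : Int) by push_cast; ring,
        ih (w * 256 + hd.toNat) (n + 1) (by simp at h ⊢; omega) (by simp at h ⊢; omega)]
      simp

-- the full loop plus A's trailing flush equals B's chunk-and-fold
theorem pv_main (l : List Char) (acc : List Int) :
    (let s := l.foldl (fun s c => pvStepA s ((c.toNat : Int))) (acc, 0, 0)
     if s.2.2 ≠ 0 then s.1 ++ [s.2.1] else s.1)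
      = acc ++ (pvChunk15 l).map (fun ch => ch.foldl (fun n c => n * 256 + (c.toNat : Int)) 0) := by
  by_cases hnil : l = []
  · subst hnil; simp [pvChunk15_nil]
  · by_cases hlen : l.length < 15
    · have h0 : (0 : ℕ) + l.length < 15 := by omega
      have := pv_noclose l acc 0 0 h0
      simp only [Nat.cast_zero] at this
      simp only [this]
      have hlp : 0 < l.length := List.length_pos_iff.mpr hnil
      have htake : l.take 15 = l := List.take_of_length_le (by omega)
      have hdrop : l.drop 15 = [] := List.drop_eq_nil_of_le (by omega)
      obtain ⟨c, rest, rfl⟩ := List.exists_cons_of_ne_nil hnil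
      rw [pvChunk15_cons, htake, hdrop, pvChunk15_nil]
      simp
      omega
    · simp at hlen
      have hsplit : l = l.take 15 ++ l.drop 15 := (List.take_append_drop 15 l).symm
      have hlen15 : (l.take 15).length = 15 := by simp; omega
      conv_lhs => rw [hsplit]
      rw [List.foldl_append]
      have hclose := pv_close (l.take 15) acc 0 0 (by omega) (by omega)
      simp only [Nat.cast_zero] at hclose
      rw [hclose]
      have ih := pv_main (l.drop 15) (acc ++ [(l.take 15).foldl (fun m c => m * 256 + (c.toNat : Int)) 0])
      simp only at ih ⊢
      rw [ih]
      obtain ⟨c, rest, rfl⟩ := List.exists_cons_of_ne_nil hnil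
      rw [pvChunk15_cons]
      simp
termination_by l.length
decreasing_by simp; omega

-- ===== VERDICT (by name: the statement is the Claim_ definition above) =====
theorem text_to_nums_spec : Claim_equal_text_to_nums := by
  intro text _
  show text_to_nums text = text_to_nums_alt text
  simp only [text_to_nums, text_to_nums_alt]
  rw [List.foldl_map]
  exact pv_main text.toList []
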